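-- pv_equiv track=rewrite | github.com/sangjun19/CodingTest | 두 방향 탈출 가능 여부 판별하기.py | dfs
-- ===== SOURCE A (Python) =====
-- def dfs(y, x, fy, fx, arr, visited):
--     visited.append((y, x))
--     if y == fy and x == fx:
--         return 1
--     for dy, dx in [[1, 0], [0, 1]]:
--         ny, nx = y + dy, x + dx
--         if 0 <= ny < fy + 1 and 0 <= nx < fx + 1:
--             if arr[ny][nx] == 1 and (ny, nx) not in visited:
--                 if dfs(ny, nx, fy, fx, arr, visited):
--                     return 1
--     return 0
-- ===== SOURCE B (Python) =====
-- def dfs(y, x, fy, fx, arr, visited):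
--     # Iterative DFS with an explicit stack and a hash set for visited lookups.
--     # The start cell is entered unconditionally, like in the recursive version,
--     # so it is taken out of the seen set before the loop (it can never be
--     # pushed again: moves only increase y + x).
--     seen = set(visited)
--     seen.discard((y, x))
--     stack = [(y, x)]
--     while stack:
--         cy, cx = stack.pop()
--         if (cy, cx) in seen:
--             continue
--         seen.add((cy, cx))
--         visited.append((cy, cx))
--         if cy == fy and cx == fx:
--             return 1
--         for ny, nx in ((cy, cx + 1), (cy + 1, cx)):  # right first, so down pops first
--             if 0 <= ny <= fy and 0 <= nx <= fx and arr[ny][nx] == 1: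
--                 stack.append((ny, nx))
--     return 0
-- ===== Notes on version B (the rewrite author's own statement) =====
-- stated objective: alternative
-- what changed: Replaces the recursive early-return DFS that threads a Python list as its visited structure by an iterative explicit-stack DFS over the same down/right moves, with visited membership kept in a hash set and candidate cells filtered at push time.
-- outside the precondition, e.g. on dfs(0, 0, 2, 0, [[1], [0]], []): A returns 0, B returns 0; on dfs(-1, 0, 1, 1, [[1], [1, 1]], []): A returns 1, B raises IndexError
import Mathlib
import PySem

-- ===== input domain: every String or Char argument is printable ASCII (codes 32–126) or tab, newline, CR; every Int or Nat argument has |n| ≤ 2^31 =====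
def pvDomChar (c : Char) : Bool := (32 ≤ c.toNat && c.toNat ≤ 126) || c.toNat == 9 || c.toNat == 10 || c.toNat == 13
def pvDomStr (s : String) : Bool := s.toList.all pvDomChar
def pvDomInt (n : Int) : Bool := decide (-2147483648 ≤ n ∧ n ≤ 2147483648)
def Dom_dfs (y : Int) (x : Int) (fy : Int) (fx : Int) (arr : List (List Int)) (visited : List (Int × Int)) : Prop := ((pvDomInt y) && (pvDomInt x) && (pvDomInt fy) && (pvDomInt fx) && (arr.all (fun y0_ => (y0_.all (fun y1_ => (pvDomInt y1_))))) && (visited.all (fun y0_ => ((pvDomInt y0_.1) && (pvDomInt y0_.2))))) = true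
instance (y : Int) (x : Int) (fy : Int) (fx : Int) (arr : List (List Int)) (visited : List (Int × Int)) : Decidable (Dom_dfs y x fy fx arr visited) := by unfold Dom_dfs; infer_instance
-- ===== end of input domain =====

-- B replaces A's recursive DFS (whose visited structure is a Python list) by an iterative
-- explicit-stack DFS with visited kept in a hash set; same down/right moves, same return
-- value and the same appends to `visited` (both Pythons mutate it identically).

-- arr[i][j], total form: exact wherever Python does not raise (inside Pre_dfs both ports
-- only evaluate it in range or behind guards making both agree).
def pvCell (arr : List (List Int)) (i j : Int) : Int :=
  PySem.List.pyGetD (PySem.List.pyGetD arr i []) j 0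

-- the in-bounds cells of the rectangle [0,fy] × [0,fx] (used only in termination measures and proofs)
def pvCells (fy fx : Int) : Finset (Int × Int) :=
  ((PySem.List.pyRange 0 (fy + 1) 1).flatMap
    (fun i => (PySem.List.pyRange 0 (fx + 1) 1).map (fun j => (i, j)))).toFinset

theorem mem_pvCells (fy fx a b : Int) :
    (a, b) ∈ pvCells fy fx ↔ (0 ≤ a ∧ a ≤ fy ∧ 0 ≤ b ∧ b ≤ fx) := by
  simp only [pvCells, List.mem_toFinset, List.mem_flatMap, List.mem_map,
    PySem.List.mem_pyRange_one, Prod.mk.injEq]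
  constructor
  · rintro ⟨i, hi, j, hj, rfl, rfl⟩
    omega
  · intro h
    exact ⟨a, by omega, b, by omega, rfl, rfl⟩

-- termination measure for the A port: #(in-bounds cells not yet visited)
def pvMu (fy fx : Int) (v : List (Int × Int)) : Nat := ((pvCells fy fx) \ v.toFinset).card

theorem pvMu_append_le (fy fx : Int) (v w : List (Int × Int)) :
    pvMu fy fx (v ++ w) ≤ pvMu fy fx v := by
  apply Finset.card_le_card
  apply Finset.sdiff_subset_sdiff (Finset.Subset.refl _)
  simp [List.toFinset_append]

theorem pvMu_append_lt (fy fx a b : Int) (v : List (Int × Int))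
    (h1 : 0 ≤ a) (h2 : a ≤ fy) (h3 : 0 ≤ b) (h4 : b ≤ fx) (hv : (a, b) ∉ v) :
    pvMu fy fx (v ++ [(a, b)]) < pvMu fy fx v := by
  have hcell : (a, b) ∈ pvCells fy fx := (mem_pvCells fy fx a b).2 ⟨h1, h2, h3, h4⟩
  have hsub : (pvCells fy fx) \ (v ++ [(a, b)]).toFinset ⊆ (pvCells fy fx) \ v.toFinset := by
    apply Finset.sdiff_subset_sdiff (Finset.Subset.refl _)
    simp [List.toFinset_append]
  apply Finset.card_lt_card
  refine (Finset.ssubset_iff_of_subset hsub).2 ⟨(a, b), ?_, ?_⟩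
  · simp [Finset.mem_sdiff, hcell, hv]
  · simp [List.toFinset_append]

-- ===== PORT A =====
-- A's recursion, with the mutated Python list `visited` threaded as state (the pair's
-- second component); the subtype only records that visited grows, used for termination.
mutual
def pvAuxD (fy fx : Int) (arr : List (List Int)) (y x : Int) (v : List (Int × Int)) :
    Int × { v' : List (Int × Int) // ∃ w, v' = v ++ w } :=
  if y = fy ∧ x = fx then (1, ⟨v ++ [(y, x)], ⟨[(y, x)], rfl⟩⟩)
  else
    let p := pvTryD fy fx arr [(1, 0), (0, 1)] y x (v ++ [(y, x)])
    (p.1, ⟨p.2.val, by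
      obtain ⟨w, hw⟩ := p.2.property
      exact ⟨(y, x) :: w, by simp [hw]⟩⟩)
  termination_by 3 * pvMu fy fx v + (if (0 ≤ y ∧ y ≤ fy ∧ 0 ≤ x ∧ x ≤ fx ∧ (y, x) ∉ v) then 1 else 4)
  decreasing_by
    by_cases hg : (0 ≤ y ∧ y ≤ fy ∧ 0 ≤ x ∧ x ≤ fx ∧ (y, x) ∉ v)
    · have := pvMu_append_lt fy fx y x v hg.1 hg.2.1 hg.2.2.1 hg.2.2.2.1 hg.2.2.2.2
      simp only [if_pos hg, List.length_cons, List.length_nil]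
      omega
    · have := pvMu_append_le fy fx v [(y, x)]
      simp only [if_neg hg, List.length_cons, List.length_nil]
      omega

def pvTryD (fy fx : Int) (arr : List (List Int)) (moves : List (Int × Int)) (y x : Int)
    (v1 : List (Int × Int)) :
    Int × { v' : List (Int × Int) // ∃ w, v' = v1 ++ w } :=
  match moves with
  | [] => (0, ⟨v1, ⟨[], by simp⟩⟩)
  | (dy, dx) :: rest =>
    let ny := y + dy
    let nx := x + dx
    if hb : 0 ≤ ny ∧ ny < fy + 1 ∧ 0 ≤ nx ∧ nx < fx + 1 then
      if hc : pvCell arr ny nx = 1 ∧ (ny, nx) ∉ v1 then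
        match pvAuxD fy fx arr ny nx v1 with
        | (r, ⟨v2, hv2⟩) =>
          if r ≠ 0 then (1, ⟨v2, hv2⟩)
          else
            let q2 := pvTryD fy fx arr rest y x v2
            (q2.1, ⟨q2.2.val, by
              obtain ⟨w, hw⟩ := hv2
              obtain ⟨w2, hw2⟩ := q2.2.property
              exact ⟨w ++ w2, by simp [hw2, hw]⟩⟩)
      else pvTryD fy fx arr rest y x v1
    else pvTryD fy fx arr rest y x v1
  termination_by 3 * pvMu fy fx v1 + moves.length + 1
  decreasing_by
  · -- call pvAuxD ny nx v1, with hb and hc in scope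
    have hg : (0 ≤ y + dy ∧ y + dy ≤ fy ∧ 0 ≤ x + dx ∧ x + dx ≤ fx ∧ (y + dy, x + dx) ∉ v1) := by
      refine ⟨hb.1, by omega, hb.2.2.1, by omega, hc.2⟩
    simp only [if_pos hg, List.length_cons]
    omega
  · -- call pvTryD rest with v2
    obtain ⟨w, hw⟩ := hv2
    have := pvMu_append_le fy fx v1 w
    rw [← hw] at this
    simp only [List.length_cons]
    omega
  · simp only [List.length_cons]; omega
  · simp only [List.length_cons]; omega
end

def dfs (y : Int) (x : Int) (fy : Int) (fx : Int) (arr : List (List Int)) (visited : List (Int × Int)) : Int :=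
  (pvAuxD fy fx arr y x visited).1

-- ===== PORT B =====
-- push a candidate cell if it is in bounds and its grid value is 1 (B checks this at push time)
def pvPush (fy fx : Int) (arr : List (List Int)) (c : Int × Int) (stack : List (Int × Int)) :
    List (Int × Int) :=
  if 0 ≤ c.1 ∧ c.1 ≤ fy ∧ 0 ≤ c.2 ∧ c.2 ≤ fx ∧ pvCell arr c.1 c.2 = 1 then c :: stack else stack

-- termination measure for the B port
def pvNu (fy fx : Int) (stack seen : List (Int × Int)) : Nat :=
  3 * (((pvCells fy fx) ∪ stack.toFinset) \ seen.toFinset).card + stack.length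

theorem pvNu_skip (fy fx : Int) (c : Int × Int) (rest seen : List (Int × Int)) :
    pvNu fy fx rest seen < pvNu fy fx (c :: rest) seen := by
  have h : (((pvCells fy fx) ∪ rest.toFinset) \ seen.toFinset).card ≤
      (((pvCells fy fx) ∪ (c :: rest).toFinset) \ seen.toFinset).card := by
    apply Finset.card_le_card
    apply Finset.sdiff_subset_sdiff _ (Finset.Subset.refl _)
    apply Finset.union_subset_union (Finset.Subset.refl _)
    simp [List.toFinset_cons, Finset.subset_insert]
  simp only [pvNu, List.length_cons]
  omega

theorem pvNu_step (fy fx : Int) (c : Int × Int) (stack' rest seen : List (Int × Int))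
    (hsub : stack'.toFinset ⊆ (pvCells fy fx) ∪ rest.toFinset)
    (hlen : stack'.length ≤ rest.length + 2)
    (hc : c ∉ seen) :
    pvNu fy fx stack' (seen ++ [c]) < pvNu fy fx (c :: rest) seen := by
  have hcA : c ∈ ((pvCells fy fx) ∪ (c :: rest).toFinset) \ seen.toFinset := by
    simp [List.toFinset_cons, hc]
  have hsub2 : ((pvCells fy fx) ∪ stack'.toFinset) \ (seen ++ [c]).toFinset ⊆
      (((pvCells fy fx) ∪ (c :: rest).toFinset) \ seen.toFinset).erase c := by
    intro z hz
    simp only [Finset.mem_sdiff, Finset.mem_union, List.toFinset_append, List.toFinset_cons,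
      List.toFinset_nil, Finset.mem_erase, insert_empty_eq, Finset.mem_insert,
      Finset.mem_singleton] at hz ⊢
    rcases hz with ⟨hz1, hz2⟩
    push Not at hz2
    refine ⟨hz2.2, ?_, hz2.1⟩
    rcases hz1 with h | h
    · exact Or.inl h
    · have := hsub (by simpa using h)
      simp only [Finset.mem_union] at this
      rcases this with h' | h'
      · exact Or.inl h'
      · exact Or.inr (Or.inr (by simpa using h'))
  have h1 : (((pvCells fy fx) ∪ stack'.toFinset) \ (seen ++ [c]).toFinset).card ≤
      (((pvCells fy fx) ∪ (c :: rest).toFinset) \ seen.toFinset).card - 1 := by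
    calc _ ≤ ((((pvCells fy fx) ∪ (c :: rest).toFinset) \ seen.toFinset).erase c).card :=
          Finset.card_le_card hsub2
    _ = _ := Finset.card_erase_of_mem hcA
  have h2 : 0 < (((pvCells fy fx) ∪ (c :: rest).toFinset) \ seen.toFinset).card :=
    Finset.card_pos.2 ⟨c, hcA⟩
  simp only [pvNu, List.length_cons]
  omega

theorem pvPush_toFinset_subset (fy fx : Int) (arr : List (List Int)) (c : Int × Int)
    (st : List (Int × Int)) :
    (pvPush fy fx arr c st).toFinset ⊆ (pvCells fy fx) ∪ st.toFinset := by
  unfold pvPush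
  split_ifs with h
  · intro z hz
    simp only [List.toFinset_cons, Finset.mem_insert] at hz
    rcases hz with rfl | hz
    · apply Finset.mem_union_left
      exact (mem_pvCells fy fx z.1 z.2).2 (by omega)
    · exact Finset.mem_union_right _ hz
  · exact Finset.subset_union_right

theorem pvPush_length_le (fy fx : Int) (arr : List (List Int)) (c : Int × Int)
    (st : List (Int × Int)) :
    (pvPush fy fx arr c st).length ≤ st.length + 1 := by
  unfold pvPush; split_ifs <;> simp

-- B's loop: pop, skip if seen, mark, test target, push right then down (so down pops first)
def pvLoop (fy fx : Int) (arr : List (List Int)) (stack : List (Int × Int))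
    (seen : PySem.Set (Int × Int)) : Int :=
  match stack with
  | [] => 0
  | (cy, cx) :: rest =>
    if (cy, cx) ∈ seen then pvLoop fy fx arr rest seen
    else
      if cy = fy ∧ cx = fx then 1
      else pvLoop fy fx arr (pvPush fy fx arr (cy + 1, cx) (pvPush fy fx arr (cy, cx + 1) rest))
        (PySem.Set.add seen (cy, cx))
  termination_by pvNu fy fx stack seen
  decreasing_by
  · exact pvNu_skip fy fx (cy, cx) rest seen
  · rename_i hmem _
    rw [PySem.Set.add_of_not_mem hmem]
    apply pvNu_step
    · intro z hz
      have h1 := pvPush_toFinset_subset fy fx arr (cy + 1, cx) (pvPush fy fx arr (cy, cx + 1) rest) hz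
      simp only [Finset.mem_union] at h1 ⊢
      rcases h1 with h | h
      · exact Or.inl h
      · have h2 := pvPush_toFinset_subset fy fx arr (cy, cx + 1) rest h
        simpa using h2
    · have h1 := pvPush_length_le fy fx arr (cy + 1, cx) (pvPush fy fx arr (cy, cx + 1) rest)
      have h2 := pvPush_length_le fy fx arr (cy, cx + 1) rest
      omega
    · exact hmem

def dfs_alt (y : Int) (x : Int) (fy : Int) (fx : Int) (arr : List (List Int)) (visited : List (Int × Int)) : Int :=
  pvLoop fy fx arr [(y, x)] (PySem.Set.discard (PySem.Set.ofList visited) (y, x))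

-- ===== PRECONDITION & SPEC =====
-- Pre_ excludes grids that do not cover the whole rectangle [0,fy]×[0,fx] (unless A provably
-- returns without indexing the grid): on those A may raise IndexError, and where A happens to
-- return, the two implementations index different cells, so B may raise instead.
def Pre_dfs (y : Int) (x : Int) (fy : Int) (fx : Int) (arr : List (List Int)) (visited : List (Int × Int)) : Prop :=
  (y = fy ∧ x = fx)
  ∨ (fy < 0 ∨ fx < 0 ∨ ((fy : Int) < arr.length ∧ ∀ row ∈ arr.take (fy + 1).toNat, (fx : Int) < row.length))
  ∨ (¬(0 ≤ y + 1 ∧ y + 1 ≤ fy ∧ 0 ≤ x ∧ x ≤ fx) ∧ ¬(0 ≤ y ∧ y ≤ fy ∧ 0 ≤ x + 1 ∧ x + 1 ≤ fx))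
instance (y : Int) (x : Int) (fy : Int) (fx : Int) (arr : List (List Int)) (visited : List (Int × Int)) : Decidable (Pre_dfs y x fy fx arr visited) := by unfold Pre_dfs; infer_instance

def pvWitness_dfs : Int × Int × Int × Int × List (List Int) × (List (Int × Int)) :=
  (0, 0, 1, 1, [[1, 1], [0, 1]], [])

def Spec_dfs (y : Int) (x : Int) (fy : Int) (fx : Int) (arr : List (List Int)) (visited : List (Int × Int)) (out : Int) : Prop := out = dfs_alt y x fy fx arr visited
instance (y : Int) (x : Int) (fy : Int) (fx : Int) (arr : List (List Int)) (visited : List (Int × Int)) (out : Int) : Decidable (Spec_dfs y x fy fx arr visited out) := by unfold Spec_dfs; infer_instance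

-- ===== CLAIM (what is proved, stated in full; the proofs are below) =====
def Claim_equal_dfs : Prop := ∀ (y : Int) (x : Int) (fy : Int) (fx : Int) (arr : List (List Int)) (visited : List (Int × Int)), Dom_dfs y x fy fx arr visited → Pre_dfs y x fy fx arr visited → Spec_dfs y x fy fx arr visited (dfs y x fy fx arr visited)

-- ===== LEMMAS AND PROOFS =====

theorem pvLoop_nil (fy fx : Int) (arr : List (List Int)) (seen : PySem.Set (Int × Int)) :
    pvLoop fy fx arr [] seen = 0 := by
  rw [pvLoop]

theorem pvLoop_cons_mem (fy fx : Int) (arr : List (List Int)) (cy cx : Int)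
    (rest : List (Int × Int)) (seen : PySem.Set (Int × Int)) (h : (cy, cx) ∈ seen) :
    pvLoop fy fx arr ((cy, cx) :: rest) seen = pvLoop fy fx arr rest seen := by
  rw [pvLoop]; simp [h]

theorem pvLoop_cons_target (fy fx : Int) (arr : List (List Int)) (cy cx : Int)
    (rest : List (Int × Int)) (seen : PySem.Set (Int × Int)) (h : (cy, cx) ∉ seen)
    (ht : cy = fy ∧ cx = fx) :
    pvLoop fy fx arr ((cy, cx) :: rest) seen = 1 := by
  rw [pvLoop]; rw [if_neg h, if_pos ht]

theorem pvLoop_cons_go (fy fx : Int) (arr : List (List Int)) (cy cx : Int)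
    (rest : List (Int × Int)) (seen : PySem.Set (Int × Int)) (h : (cy, cx) ∉ seen)
    (ht : ¬(cy = fy ∧ cx = fx)) :
    pvLoop fy fx arr ((cy, cx) :: rest) seen =
      pvLoop fy fx arr (pvPush fy fx arr (cy + 1, cx) (pvPush fy fx arr (cy, cx + 1) rest))
        (PySem.Set.add seen (cy, cx)) := by
  rw [pvLoop]; simp [h, ht]

theorem pvLoop_congr (fy fx : Int) (arr : List (List Int)) (st s : List (Int × Int)) :
    ∀ t : List (Int × Int), (∀ c, c ∈ s ↔ c ∈ t) →
      pvLoop fy fx arr st s = pvLoop fy fx arr st t := by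
  fun_induction pvLoop fy fx arr st s with
  | case1 seen => intro t h; rw [pvLoop_nil]
  | case2 seen cy cx rest hmem ih =>
    intro t h
    rw [pvLoop_cons_mem _ _ _ _ _ _ t ((h _).1 hmem)]
    exact ih t h
  | case3 seen cy cx rest hmem ht =>
    intro t h
    rw [pvLoop_cons_target _ _ _ _ _ _ t (fun hc => hmem ((h _).2 hc)) ht]
  | case4 seen cy cx rest hmem ht ih =>
    intro t h
    rw [pvLoop_cons_go _ _ _ _ _ _ t (fun hc => hmem ((h _).2 hc)) ht]
    apply ih
    intro c
    simp only [PySem.Set.mem_add]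
    rw [h c]

theorem pvAuxD_fst_target (fy fx : Int) (arr : List (List Int)) (y x : Int)
    (v : List (Int × Int)) (ht : y = fy ∧ x = fx) : (pvAuxD fy fx arr y x v).1 = 1 := by
  rw [pvAuxD]; simp [ht]

theorem pvAuxD_fst_go (fy fx : Int) (arr : List (List Int)) (y x : Int)
    (v : List (Int × Int)) (ht : ¬(y = fy ∧ x = fx)) :
    (pvAuxD fy fx arr y x v).1 = (pvTryD fy fx arr [(1, 0), (0, 1)] y x (v ++ [(y, x)])).1 := by
  rw [pvAuxD]; simp [ht]

theorem pvAuxD_snd_go (fy fx : Int) (arr : List (List Int)) (y x : Int)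
    (v : List (Int × Int)) (ht : ¬(y = fy ∧ x = fx)) :
    (pvAuxD fy fx arr y x v).2.val = (pvTryD fy fx arr [(1, 0), (0, 1)] y x (v ++ [(y, x)])).2.val := by
  rw [pvAuxD]; simp [ht]

theorem pvTryD_nil (fy fx : Int) (arr : List (List Int)) (y x : Int) (v1 : List (Int × Int)) :
    (pvTryD fy fx arr [] y x v1).1 = 0 ∧ (pvTryD fy fx arr [] y x v1).2.val = v1 := by
  rw [pvTryD]; exact ⟨rfl, rfl⟩

theorem pvTryD_cons_nb (fy fx : Int) (arr : List (List Int)) (dy dx : Int)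
    (rest : List (Int × Int)) (y x : Int) (v1 : List (Int × Int))
    (hb : ¬(0 ≤ y + dy ∧ y + dy < fy + 1 ∧ 0 ≤ x + dx ∧ x + dx < fx + 1)) :
    pvTryD fy fx arr ((dy, dx) :: rest) y x v1 = pvTryD fy fx arr rest y x v1 := by
  rw [pvTryD]; simp only [dif_neg hb]

theorem pvTryD_cons_nc (fy fx : Int) (arr : List (List Int)) (dy dx : Int)
    (rest : List (Int × Int)) (y x : Int) (v1 : List (Int × Int))
    (hb : 0 ≤ y + dy ∧ y + dy < fy + 1 ∧ 0 ≤ x + dx ∧ x + dx < fx + 1)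
    (hc : ¬(pvCell arr (y + dy) (x + dx) = 1 ∧ (y + dy, x + dx) ∉ v1)) :
    pvTryD fy fx arr ((dy, dx) :: rest) y x v1 = pvTryD fy fx arr rest y x v1 := by
  rw [pvTryD]; simp only [dif_pos hb, dif_neg hc]

theorem pvTryD_cons_hit (fy fx : Int) (arr : List (List Int)) (dy dx : Int)
    (rest : List (Int × Int)) (y x : Int) (v1 : List (Int × Int))
    (hb : 0 ≤ y + dy ∧ y + dy < fy + 1 ∧ 0 ≤ x + dx ∧ x + dx < fx + 1)
    (hc : pvCell arr (y + dy) (x + dx) = 1 ∧ (y + dy, x + dx) ∉ v1)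
    (hr : (pvAuxD fy fx arr (y + dy) (x + dx) v1).1 ≠ 0) :
    (pvTryD fy fx arr ((dy, dx) :: rest) y x v1).1 = 1 ∧
    (pvTryD fy fx arr ((dy, dx) :: rest) y x v1).2.val = (pvAuxD fy fx arr (y + dy) (x + dx) v1).2.val := by
  rw [pvTryD]
  simp only [dif_pos hb, dif_pos hc]
  rcases h : pvAuxD fy fx arr (y + dy) (x + dx) v1 with ⟨r, ⟨v2, hv2⟩⟩
  rw [h] at hr
  simp only [if_pos hr]
  exact ⟨trivial, trivial⟩

theorem pvTryD_cons_miss (fy fx : Int) (arr : List (List Int)) (dy dx : Int)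
    (rest : List (Int × Int)) (y x : Int) (v1 : List (Int × Int))
    (hb : 0 ≤ y + dy ∧ y + dy < fy + 1 ∧ 0 ≤ x + dx ∧ x + dx < fx + 1)
    (hc : pvCell arr (y + dy) (x + dx) = 1 ∧ (y + dy, x + dx) ∉ v1)
    (hr : (pvAuxD fy fx arr (y + dy) (x + dx) v1).1 = 0) :
    (pvTryD fy fx arr ((dy, dx) :: rest) y x v1).1 =
      (pvTryD fy fx arr rest y x (pvAuxD fy fx arr (y + dy) (x + dx) v1).2.val).1 ∧
    (pvTryD fy fx arr ((dy, dx) :: rest) y x v1).2.val =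
      (pvTryD fy fx arr rest y x (pvAuxD fy fx arr (y + dy) (x + dx) v1).2.val).2.val := by
  rw [pvTryD]
  simp only [dif_pos hb, dif_pos hc]
  rcases h : pvAuxD fy fx arr (y + dy) (x + dx) v1 with ⟨r, ⟨v2, hv2⟩⟩
  rw [h] at hr
  subst hr
  simp only [ne_eq, not_true_eq_false, if_false]
  exact ⟨trivial, trivial⟩

theorem pvAuxD_zero_or_one' (fy fx : Int) (arr : List (List Int)) :
    ∀ (y x : Int) (v : List (Int × Int)),
      (pvAuxD fy fx arr y x v).1 = 0 ∨ (pvAuxD fy fx arr y x v).1 = 1 := by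
  apply pvAuxD.induct fy fx arr
    (motive1 := fun y x v => (pvAuxD fy fx arr y x v).1 = 0 ∨ (pvAuxD fy fx arr y x v).1 = 1)
    (motive2 := fun moves y x v1 =>
      (pvTryD fy fx arr moves y x v1).1 = 0 ∨ (pvTryD fy fx arr moves y x v1).1 = 1)
  · intro y x v ht
    rw [pvAuxD_fst_target fy fx arr y x v ht]; right; rfl
  · intro y x v ht ih
    rw [pvAuxD_fst_go fy fx arr y x v ht]; exact ih
  · intro y x v1
    rw [(pvTryD_nil fy fx arr y x v1).1]; left; rfl
  · intro y x v1 dy dx rest ny nx hb hc r v2 hv2 h hr ih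
    have hny : ny = y + dy := rfl
    have hnx : nx = x + dx := rfl
    clear_value ny nx
    subst hny hnx
    have hr' : (pvAuxD fy fx arr (y + dy) (x + dx) v1).1 ≠ 0 := by rw [h]; exact hr
    rw [(pvTryD_cons_hit fy fx arr dy dx rest y x v1 hb hc hr').1]; right; rfl
  · intro y x v1 dy dx rest ny nx hb hc r v2 hv2 h hr ih ih2
    have hny : ny = y + dy := rfl
    have hnx : nx = x + dx := rfl
    clear_value ny nx
    subst hny hnx
    have hr' : (pvAuxD fy fx arr (y + dy) (x + dx) v1).1 = 0 := by
      rw [h]; simpa using hr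
    rw [(pvTryD_cons_miss fy fx arr dy dx rest y x v1 hb hc hr').1, h]
    exact ih2
  · intro y x v1 dy dx rest ny nx hb hc ih
    have hny : ny = y + dy := rfl
    have hnx : nx = x + dx := rfl
    clear_value ny nx
    subst hny hnx
    rw [pvTryD_cons_nc fy fx arr dy dx rest y x v1 hb hc]; exact ih
  · intro y x v1 dy dx rest ny nx hb ih
    have hny : ny = y + dy := rfl
    have hnx : nx = x + dx := rfl
    clear_value ny nx
    subst hny hnx
    rw [pvTryD_cons_nb fy fx arr dy dx rest y x v1 hb]; exact ih

theorem pvPush_append (fy fx : Int) (arr : List (List Int)) (c : Int × Int)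
    (st rest : List (Int × Int)) :
    pvPush fy fx arr c st ++ rest = pvPush fy fx arr c (st ++ rest) := by
  unfold pvPush; split_ifs <;> simp

theorem pvSim (fy fx : Int) (arr : List (List Int)) : ∀ n : Nat,
    (∀ (y x : Int) (v rest s : List (Int × Int)),
      3 * pvMu fy fx v + (if (0 ≤ y ∧ y ≤ fy ∧ 0 ≤ x ∧ x ≤ fx ∧ (y, x) ∉ v) then 1 else 4) ≤ n →
      (∀ c, c ∈ s ↔ (c ∈ v ∧ c ≠ (y, x))) →
      pvLoop fy fx arr ((y, x) :: rest) s =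
        (if (pvAuxD fy fx arr y x v).1 = 1 then 1
         else pvLoop fy fx arr rest (PySem.Set.ofList (pvAuxD fy fx arr y x v).2.val)))
    ∧
    (∀ (moves : List (Int × Int)) (y x : Int) (v1 rest s1 : List (Int × Int)),
      3 * pvMu fy fx v1 + moves.length + 1 ≤ n →
      (∀ c, c ∈ s1 ↔ c ∈ v1) →
      pvLoop fy fx arr
          (moves.foldr (fun (m : Int × Int) acc => pvPush fy fx arr (y + m.1, x + m.2) acc) [] ++ rest) s1 =
        (if (pvTryD fy fx arr moves y x v1).1 = 1 then 1
         else pvLoop fy fx arr rest (PySem.Set.ofList (pvTryD fy fx arr moves y x v1).2.val))) := by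
  intro n
  induction n using Nat.strong_induction_on with
  | _ n IH =>
  constructor
  · -- LA
    intro y x v rest s hn hs
    have hys : (y, x) ∉ s := fun hc => ((hs _).1 hc).2 rfl
    have hv1equiv : ∀ c : Int × Int, c ∈ PySem.Set.add s (y, x) ↔ c ∈ v ++ [(y, x)] := by
      intro c
      rw [PySem.Set.mem_add, hs c, List.mem_append]
      by_cases hcx : c = (y, x) <;> simp [hcx]
    by_cases ht : y = fy ∧ x = fx
    · rw [pvLoop_cons_target fy fx arr y x rest s hys ht,
        pvAuxD_fst_target fy fx arr y x v ht]
      simp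
    · rw [pvLoop_cons_go fy fx arr y x rest s hys ht]
      have hstack : pvPush fy fx arr (y + 1, x) (pvPush fy fx arr (y, x + 1) rest) =
          (([(1, 0), (0, 1)] : List (Int × Int)).foldr
            (fun (m : Int × Int) acc => pvPush fy fx arr (y + m.1, x + m.2) acc) []) ++ rest := by
        simp only [List.foldr_cons, List.foldr_nil, add_zero]
        rw [pvPush_append, pvPush_append]
        simp
      have hn1 : 1 ≤ n := by split_ifs at hn <;> omega
      have hbound : 3 * pvMu fy fx (v ++ [(y, x)]) + ([(1, 0), (0, 1)] : List (Int × Int)).length + 1 ≤ n - 1 := by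
        by_cases hg : (0 ≤ y ∧ y ≤ fy ∧ 0 ≤ x ∧ x ≤ fx ∧ (y, x) ∉ v)
        · have := pvMu_append_lt fy fx y x v hg.1 hg.2.1 hg.2.2.1 hg.2.2.2.1 hg.2.2.2.2
          rw [if_pos hg] at hn
          simp only [List.length_cons, List.length_nil]
          omega
        · have := pvMu_append_le fy fx v [(y, x)]
          rw [if_neg hg] at hn
          simp only [List.length_cons, List.length_nil]
          omega
      have hLT := (IH (n - 1) (by omega)).2 [(1, 0), (0, 1)] y x (v ++ [(y, x)]) rest
        (PySem.Set.add s (y, x)) hbound hv1equiv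
      rw [hstack, hLT, pvAuxD_fst_go fy fx arr y x v ht, pvAuxD_snd_go fy fx arr y x v ht]
  · -- LT
    intro moves y x v1 rest s1 hn hs
    match moves with
    | [] =>
      simp only [List.foldr_nil, List.nil_append, (pvTryD_nil fy fx arr y x v1).1,
        (pvTryD_nil fy fx arr y x v1).2]
      rw [if_neg (by norm_num)]
      exact pvLoop_congr fy fx arr rest s1 _ (fun c => by rw [hs c, PySem.Set.mem_ofList])
    | (dy, dx) :: rest' =>
      simp only [List.length_cons] at hn
      by_cases hb : 0 ≤ y + dy ∧ y + dy < fy + 1 ∧ 0 ≤ x + dx ∧ x + dx < fx + 1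
      · by_cases hcell : pvCell arr (y + dy) (x + dx) = 1
        · -- pushed
          have hpush : ∀ st, pvPush fy fx arr (y + dy, x + dx) st = (y + dy, x + dx) :: st := by
            intro st
            unfold pvPush
            rw [if_pos (by constructor <;> [exact hb.1; constructor <;> [omega; exact ⟨hb.2.2.1, by omega, hcell⟩]])]
          by_cases hmem : (y + dy, x + dx) ∈ v1
          · -- A skips by membership; B pops and skips
            have hc : ¬(pvCell arr (y + dy) (x + dx) = 1 ∧ (y + dy, x + dx) ∉ v1) := by
              simp [hcell, hmem]
            rw [pvTryD_cons_nc fy fx arr dy dx rest' y x v1 hb hc]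
            simp only [List.foldr_cons, hpush, List.cons_append]
            rw [pvLoop_cons_mem fy fx arr (y + dy) (x + dx) _ s1 ((hs _).2 hmem)]
            exact (IH (n - 1) (by omega)).2 rest' y x v1 rest s1 (by omega) hs
          · -- A recurses; B pops fresh
            have hc : pvCell arr (y + dy) (x + dx) = 1 ∧ (y + dy, x + dx) ∉ v1 := ⟨hcell, hmem⟩
            have hs' : ∀ c : Int × Int, c ∈ s1 ↔ (c ∈ v1 ∧ c ≠ (y + dy, x + dx)) := by
              intro c
              rw [hs c]
              constructor
              · intro hcv
                exact ⟨hcv, fun hh => hmem (hh ▸ hcv)⟩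
              · exact fun hh => hh.1
            have hboundA : 3 * pvMu fy fx v1 +
                (if (0 ≤ y + dy ∧ y + dy ≤ fy ∧ 0 ≤ x + dx ∧ x + dx ≤ fx ∧ (y + dy, x + dx) ∉ v1) then 1 else 4) ≤ n - 1 := by
              rw [if_pos ⟨hb.1, by omega, hb.2.2.1, by omega, hmem⟩]
              omega
            have hLA := (IH (n - 1) (by omega)).1 (y + dy) (x + dx) v1
              (rest'.foldr (fun (m : Int × Int) acc => pvPush fy fx arr (y + m.1, x + m.2) acc) [] ++ rest) s1 hboundA hs'
            simp only [List.foldr_cons, hpush, List.cons_append]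
            rw [hLA]
            rcases pvAuxD_zero_or_one' fy fx arr (y + dy) (x + dx) v1 with h0 | h1
            · -- subtree failed: continue with rest' from v2
              rw [if_neg (by rw [h0]; norm_num)]
              have hmiss := pvTryD_cons_miss fy fx arr dy dx rest' y x v1 hb hc h0
              rw [hmiss.1, hmiss.2]
              obtain ⟨w, hw⟩ := (pvAuxD fy fx arr (y + dy) (x + dx) v1).2.property
              have hmu2 : pvMu fy fx (pvAuxD fy fx arr (y + dy) (x + dx) v1).2.val ≤ pvMu fy fx v1 := by
                rw [hw]; exact pvMu_append_le fy fx v1 w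
              exact (IH (n - 1) (by omega)).2 rest' y x
                (pvAuxD fy fx arr (y + dy) (x + dx) v1).2.val rest
                (PySem.Set.ofList (pvAuxD fy fx arr (y + dy) (x + dx) v1).2.val)
                (by omega) (fun c => by rw [PySem.Set.mem_ofList])
            · -- subtree hit: both 1
              have hhit := pvTryD_cons_hit fy fx arr dy dx rest' y x v1 hb hc (by rw [h1]; norm_num)
              rw [if_pos h1, hhit.1]
              simp
        · -- cell ≠ 1: not pushed, A skips
          have hc : ¬(pvCell arr (y + dy) (x + dx) = 1 ∧ (y + dy, x + dx) ∉ v1) := by simp [hcell]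
          have hpush : ∀ st, pvPush fy fx arr (y + dy, x + dx) st = st := by
            intro st; unfold pvPush
            rw [if_neg (by intro hh; exact hcell hh.2.2.2.2)]
          rw [pvTryD_cons_nc fy fx arr dy dx rest' y x v1 hb hc]
          simp only [List.foldr_cons, hpush]
          exact (IH (n - 1) (by omega)).2 rest' y x v1 rest s1 (by omega) hs
      · -- out of bounds: not pushed, A skips
        have hpush : ∀ st, pvPush fy fx arr (y + dy, x + dx) st = st := by
          intro st; unfold pvPush
          rw [if_neg (by intro hh; exact hb ⟨hh.1, by omega, hh.2.2.1, by omega⟩)]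
        rw [pvTryD_cons_nb fy fx arr dy dx rest' y x v1 hb]
        simp only [List.foldr_cons, hpush]
        exact (IH (n - 1) (by omega)).2 rest' y x v1 rest s1 (by omega) hs

-- ===== VERDICT (by name: the statement is the Claim_ definition above) =====
theorem dfs_spec : Claim_equal_dfs := by
  intro y x fy fx arr visited _ _
  unfold Spec_dfs dfs dfs_alt
  have hs : ∀ c : Int × Int,
      c ∈ PySem.Set.discard (PySem.Set.ofList visited) (y, x) ↔ (c ∈ visited ∧ c ≠ (y, x)) :=
    fun c => by rw [PySem.Set.mem_discard, PySem.Set.mem_ofList]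
  have h := (pvSim fy fx arr (3 * pvMu fy fx visited + 4)).1 y x visited []
    (PySem.Set.discard (PySem.Set.ofList visited) (y, x)) (by split_ifs <;> omega) hs
  rcases pvAuxD_zero_or_one' fy fx arr y x visited with h0 | h1
  · rw [h, if_neg (by rw [h0]; norm_num), pvLoop_nil, h0]
  · rw [h, if_pos h1, h1]
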